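-- pv_equiv track=rewrite | github.com/Classe-4CA-DucaDegliAbruzzi/CalcolatriceGrafica | doc/add_links.py | add_links
-- ===== SOURCE A (Python) =====
-- def add_links(content: str, link_name):
--     fmt_link = f"`{link_name}`"
--     start = 0
--     new_content = ""
--     while True:
--         new_start = content.find(fmt_link, start)
--         if new_start == -1:
--             new_content += content[start:]
--             break
--         new_content += content[start:new_start]
--         start = new_start + len(fmt_link)
--         if new_content[-1] == "[":  # if it has already a link
--             new_content += fmt_link
--             continue
--         new_content += f"[{fmt_link}]({link_name}.md)"
--
--     return new_content
-- ===== SOURCE B (Python) =====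
-- def add_links(content: str, link_name):
--     fmt_link = f"`{link_name}`"
--     parts = content.split(fmt_link)
--     result = parts[0]
--     for part in parts[1:]:
--         if result.endswith("["):
--             result += fmt_link
--         else:
--             result += f"[{fmt_link}]({link_name}.md)"
--         result += part
--     return result
-- ===== Notes on version B (the rewrite author's own statement) =====
-- stated objective: simpler
-- what changed: A's offset-tracking while-loop around content.find is replaced by a single content.split(fmt_link) followed by one fold over the pieces, testing result.endswith('[') instead of indexing result[-1].
-- crash fix: When content starts with f"`{link_name}`", A's new_content[-1] indexes an empty string and raises IndexError; B returns the content with that leading occurrence wrapped as a markdown link. — e.g. on add_links("`x` b", "x"): A raises IndexError, B returns "[`x`](x.md) b"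
import Mathlib
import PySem

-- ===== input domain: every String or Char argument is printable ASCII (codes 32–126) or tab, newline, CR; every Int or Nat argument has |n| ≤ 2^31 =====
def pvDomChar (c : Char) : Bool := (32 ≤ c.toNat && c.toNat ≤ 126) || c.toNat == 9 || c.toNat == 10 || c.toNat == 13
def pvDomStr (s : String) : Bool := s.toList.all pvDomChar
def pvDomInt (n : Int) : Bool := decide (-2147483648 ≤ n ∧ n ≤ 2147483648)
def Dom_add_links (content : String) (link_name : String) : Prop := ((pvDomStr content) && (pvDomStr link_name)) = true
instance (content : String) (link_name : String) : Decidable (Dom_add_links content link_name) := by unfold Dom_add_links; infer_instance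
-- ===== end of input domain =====

-- B replaces A's offset-tracking find loop by one split on the formatted link followed by a single
-- fold over the pieces (objective: simpler decomposition, same cost).

-- ===== PORT A =====

-- Needed by the loop's termination proof: a successful find(sub, start) lies at or after start
-- and leaves room for sub inside s.
theorem pv_findFrom_nat_bounds (s sub : List Char) (k : Nat)
    (h : PySem.Chars.findFrom s sub (k : Int) none ≠ -1) :
    k ≤ (PySem.Chars.findFrom s sub (k : Int) none).toNat ∧
      (PySem.Chars.findFrom s sub (k : Int) none).toNat + sub.length ≤ s.length := by
  by_cases hk : k ≤ s.length
  · rw [PySem.Chars.findFrom_natCast s sub k hk] at h ⊢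
    by_cases hf : PySem.Chars.find (List.drop k s) sub = -1
    · simp [hf] at h
    · have h0 : 0 ≤ PySem.Chars.find (List.drop k s) sub := by
        have := PySem.Chars.neg_one_le_find (List.drop k s) sub; omega
      have hpre := (PySem.Chars.find_spec h0).1
      have hlen := hpre.length_le
      rw [List.length_drop, List.length_drop] at hlen
      have hle := PySem.Chars.find_le_length (List.drop k s) sub
      rw [List.length_drop] at hle
      rw [if_neg hf]
      omega
  · exfalso
    apply h
    simp only [PySem.Chars.findFrom]
    have : (s.length : Int) < (k : Int) := by exact_mod_cast Nat.lt_of_not_le hk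
    split <;> omega

-- A's while-loop: state (start, new_content); fmt_link is the pure value f"`{link_name}`",
-- recomputed from link at each entry.
def addLinksLoop (content link : List Char) (start : Nat) (acc : List Char) : List Char :=
  let fmt := '`' :: (link ++ ['`'])
  let ns := PySem.Chars.findFrom content fmt (start : Int) none
  if _hns : ns = -1 then
    acc ++ PySem.Chars.slice content (some (start : Int)) none
  else
    let acc1 := acc ++ PySem.Chars.slice content (some (start : Int)) (some ns)
    let start1 := ns.toNat + fmt.length
    match PySem.List.pyGet? acc1 (-1) with
    | none => acc1   -- Python raises IndexError here; excluded by Pre_add_links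
    | some c =>
      if c = '[' then addLinksLoop content link start1 (acc1 ++ fmt)
      else addLinksLoop content link start1 (acc1 ++ ('[' :: fmt ++ ']' :: '(' :: link ++ ".md)".toList))
termination_by content.length + 1 - start
decreasing_by
  all_goals
    have hb := pv_findFrom_nat_bounds content ('`' :: (link ++ ['`'])) start _hns
    simp only [List.length_cons, List.length_append] at hb ⊢
    omega

def add_links (content : String) (link_name : String) : String :=
  String.ofList (addLinksLoop content.toList link_name.toList 0 [])

-- ===== PORT B =====

-- the body of B's for-loop (one fold step)
def linkStep (link : List Char) (res part : List Char) : List Char :=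
  let fmt := '`' :: (link ++ ['`'])
  (if PySem.Chars.endswith res ['['] then res ++ fmt
   else res ++ ('[' :: fmt ++ ']' :: '(' :: link ++ ".md)".toList)) ++ part

def add_links_alt (content : String) (link_name : String) : String :=
  let link := link_name.toList
  let parts := PySem.Chars.splitOn content.toList ('`' :: (link ++ ['`']))
  String.ofList ((parts.drop 1).foldl (linkStep link) (parts.headD []))

-- ===== PRECONDITION & SPEC =====
-- Pre_ excludes exactly the inputs where content starts with f"`{link_name}`": there A's
-- new_content[-1] hits an empty string and raises IndexError.
def Pre_add_links (content : String) (link_name : String) : Prop :=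
  PySem.Chars.startswith content.toList ('`' :: (link_name.toList ++ ['`'])) = false
instance (content : String) (link_name : String) : Decidable (Pre_add_links content link_name) := by
  unfold Pre_add_links; infer_instance

def pvWitness_add_links : String × String := ("see `f` and `g`.", "f")

-- On inputs whose content starts with f"`{link_name}`" A raises IndexError; B returns the text
-- with that leading occurrence wrapped as a markdown link.
def Raises_add_links (content : String) (link_name : String) : Prop :=
  PySem.Chars.startswith content.toList ('`' :: (link_name.toList ++ ['`'])) = true
instance (content : String) (link_name : String) : Decidable (Raises_add_links content link_name) := by
  unfold Raises_add_links; infer_instance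
def pvRaiseWitness_add_links : String × String := ("`x` b", "x")
def pvRaiseWitnessOut_add_links : String := "[`x`](x.md) b"

def Spec_add_links (content : String) (link_name : String) (out : String) : Prop :=
  out = add_links_alt content link_name
instance (content : String) (link_name : String) (out : String) : Decidable (Spec_add_links content link_name out) := by
  unfold Spec_add_links; infer_instance

-- ===== CLAIM (what is proved, stated in full; the proofs are below) =====
def Claim_equal_add_links : Prop := ∀ (content : String) (link_name : String), Dom_add_links content link_name → Pre_add_links content link_name → Spec_add_links content link_name (add_links content link_name)
def Claim_raises_add_links : Prop := (∀ (content : String) (link_name : String), Dom_add_links content link_name → Raises_add_links content link_name → ¬ Pre_add_links content link_name) ∧ (Dom_add_links (pvRaiseWitness_add_links.1) (pvRaiseWitness_add_links.2) ∧ Raises_add_links (pvRaiseWitness_add_links.1) (pvRaiseWitness_add_links.2) ∧ add_links_alt (pvRaiseWitness_add_links.1) (pvRaiseWitness_add_links.2) = pvRaiseWitnessOut_add_links)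

-- ===== LEMMAS AND PROOFS =====

theorem pv_find_go_shift (sub : List Char) : ∀ (l : List Char) (k : Nat),
    PySem.Chars.find.go sub l k =
      if PySem.Chars.find.go sub l 0 = -1 then -1 else PySem.Chars.find.go sub l 0 + k := by
  intro l
  induction l with
  | nil =>
    intro k
    simp only [PySem.Chars.find.go]
    by_cases he : sub.isEmpty <;> simp [he]
  | cons c rest ih =>
    intro k
    simp only [PySem.Chars.find.go]
    by_cases hp : sub.isPrefixOf (c :: rest) <;> simp only [hp, if_true]
    · simp
    · rw [ih (k+1), ih 1]
      have hge : -1 ≤ PySem.Chars.find.go sub rest 0 := by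
        have := PySem.Chars.neg_one_le_find rest sub
        simpa [PySem.Chars.find] using this
      by_cases h0 : PySem.Chars.find.go sub rest 0 = -1 <;> simp [h0] <;> split_ifs <;> omega

theorem pv_find_nil (sub : List Char) (hsub : sub ≠ []) : PySem.Chars.find [] sub = -1 := by
  simp [PySem.Chars.find, PySem.Chars.find.go, List.isEmpty_iff, hsub]

theorem pv_find_cons_prefix (sub : List Char) (c : Char) (rest : List Char)
    (h : sub.isPrefixOf (c :: rest) = true) : PySem.Chars.find (c :: rest) sub = 0 := by
  simp [PySem.Chars.find, PySem.Chars.find.go, h]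

theorem pv_find_cons_not_prefix (sub : List Char) (c : Char) (rest : List Char)
    (h : sub.isPrefixOf (c :: rest) = false) :
    PySem.Chars.find (c :: rest) sub =
      if PySem.Chars.find rest sub = -1 then -1 else PySem.Chars.find rest sub + 1 := by
  simp only [PySem.Chars.find]
  conv_lhs => rw [PySem.Chars.find.go]
  simp only [h, Bool.false_eq_true, if_false]
  exact pv_find_go_shift sub rest 1

theorem pv_find_pos_bounds (l sub : List Char) (h : PySem.Chars.find l sub ≠ -1) :
    0 ≤ PySem.Chars.find l sub ∧
      (PySem.Chars.find l sub).toNat + sub.length ≤ l.length ∧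
      sub <+: l.drop (PySem.Chars.find l sub).toNat := by
  have h0 : 0 ≤ PySem.Chars.find l sub := by
    have := PySem.Chars.neg_one_le_find l sub; omega
  have hpre := (PySem.Chars.find_spec h0).1
  have hlen := hpre.length_le
  simp [List.length_drop] at hlen
  have hle := PySem.Chars.find_le_length l sub
  exact ⟨h0, by omega, hpre⟩

-- the find-based shape of content.split(fmt): the text before the first occurrence, then recurse
-- after it
def pieces (link : List Char) (p l : List Char) : List (List Char) :=
  let fmt : List Char := '`' :: (link ++ ['`'])
  let f := PySem.Chars.find l fmt
  if _hf : f = -1 then [p ++ l]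
  else (p ++ l.take f.toNat) :: pieces link [] (l.drop (f.toNat + fmt.length))
termination_by l.length
decreasing_by
  have hb := (pv_find_pos_bounds l ('`' :: (link ++ ['`'])) _hf).2.1
  simp only [List.length_cons, List.length_append, List.length_drop] at hb ⊢
  set f := PySem.Chars.find l ('`' :: (link ++ ['`']))
  omega

theorem pieces_ne_nil (link p l : List Char) : pieces link p l ≠ [] := by
  rw [pieces]; split <;> simp

theorem pv_pieces_cons (link : List Char) (p : List Char) (c : Char) (rest : List Char)
    (h : ('`' :: (link ++ ['`'])).isPrefixOf (c :: rest) = false) :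
    pieces link p (c :: rest) = pieces link (p ++ [c]) rest := by
  have hfind := pv_find_cons_not_prefix ('`' :: (link ++ ['`'])) c rest h
  conv_lhs => rw [pieces]
  conv_rhs => rw [pieces]
  by_cases h1 : PySem.Chars.find rest ('`' :: (link ++ ['`'])) = -1
  · simp [hfind, h1]
  · have hge := PySem.Chars.neg_one_le_find rest ('`' :: (link ++ ['`']))
    have hne : PySem.Chars.find rest ('`' :: (link ++ ['`'])) + 1 ≠ -1 := by omega
    have ht : (PySem.Chars.find rest ('`' :: (link ++ ['`'])) + 1).toNat
        = (PySem.Chars.find rest ('`' :: (link ++ ['`']))).toNat + 1 := by omega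
    simp only [hfind, h1, if_false, dif_neg hne, dif_neg not_false, ht]
    rw [Nat.add_right_comm, List.drop_succ_cons]
    simp

theorem pv_splitOn_go_eq_pieces (link : List Char) : ∀ (fuel : Nat) (l cur : List Char) (acc : List (List Char)),
    l.length < fuel →
    PySem.Chars.splitOn.go ('`' :: (link ++ ['`'])) fuel l cur acc =
      acc.reverse ++ pieces link cur.reverse l := by
  intro fuel
  induction fuel with
  | zero => intro l cur acc hl; omega
  | succ n ih =>
    intro l cur acc hl
    cases l with
    | nil =>
      rw [PySem.Chars.splitOn.go]
      · rw [pieces]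
        rw [pv_find_nil ('`' :: (link ++ ['`'])) (by simp)]
        simp
      · omega
    | cons c rest =>
      rw [PySem.Chars.splitOn.go]
      by_cases hp : ('`' :: (link ++ ['`'])).isPrefixOf (c :: rest) = true
      · simp only [hp, if_true]
        rw [ih (List.drop ('`' :: (link ++ ['`'])).length (c :: rest)) [] (cur.reverse :: acc)
          (by simp at hl ⊢; omega)]
        conv_rhs => rw [pieces]
        rw [pv_find_cons_prefix _ _ _ hp]
        simp
      · simp only [hp]
        have hp' : ('`' :: (link ++ ['`'])).isPrefixOf (c :: rest) = false := by
          simp only [Bool.not_eq_true] at hp; exact hp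
        rw [ih rest (c :: cur) acc (by simp at hl ⊢; omega), pv_pieces_cons link cur.reverse c rest hp']
        simp

theorem pv_splitOn_eq_pieces (link s : List Char) :
    PySem.Chars.splitOn s ('`' :: (link ++ ['`'])) = pieces link [] s := by
  have := pv_splitOn_go_eq_pieces link (s.length + 1) s [] [] (by omega)
  simpa [PySem.Chars.splitOn] using this

theorem pv_pyGet_neg_one (l : List Char) (hl : l ≠ []) :
    PySem.List.pyGet? l (-1) = l.getLast? := by
  have hlen : 1 ≤ l.length := List.length_pos_iff.mpr hl
  simp only [PySem.List.pyGet?, PySem.List.pyIdx?]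
  rw [if_neg (by omega), if_pos (by omega : -(l.length : Int) ≤ -1)]
  simp only [Option.bind]
  rw [List.getLast?_eq_getElem?]
  norm_num

theorem pv_endswith_single (l : List Char) (c : Char) :
    PySem.Chars.endswith l [c] = true ↔ l.getLast? = some c := by
  rw [PySem.Chars.endswith_iff, List.getLast?_eq_some_iff]
  constructor
  · rintro ⟨t, rfl⟩; exact ⟨t, rfl⟩
  · rintro ⟨t, rfl⟩; exact ⟨t, rfl⟩

-- fold over the remaining pieces, the first piece appended to the accumulated output
def gfold (link acc : List Char) (parts : List (List Char)) : List Char :=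
  match parts with
  | [] => acc
  | p :: rest => rest.foldl (linkStep link) (acc ++ p)

theorem pv_loop_base (content link : List Char) (start : Nat) (acc : List Char)
    (h2 : start ≤ content.length)
    (hA : PySem.Chars.find (content.drop start) ('`' :: (link ++ ['`'])) = -1) :
    addLinksLoop content link start acc = gfold link acc (pieces link [] (content.drop start)) := by
  have hns : PySem.Chars.findFrom content ('`' :: (link ++ ['`'])) (start : Int) none = -1 := by
    rw [PySem.Chars.findFrom_natCast content _ start h2, if_pos hA]
  rw [addLinksLoop]
  dsimp only
  rw [dif_pos hns]
  rw [pieces, dif_pos hA]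
  simp [gfold, PySem.List.slice_from content (by omega : (0:Int) ≤ (start : Int))]

theorem pv_loop_eq (content link : List Char) : ∀ (n start : Nat) (acc : List Char),
    content.length - start ≤ n → start ≤ content.length →
    (acc ≠ [] ∨ PySem.Chars.find (content.drop start) ('`' :: (link ++ ['`'])) ≠ 0) →
    addLinksLoop content link start acc = gfold link acc (pieces link [] (content.drop start)) := by
  intro n
  induction n with
  | zero =>
    intro start acc h1 h2 _
    have hdrop : content.drop start = [] := by
      apply List.drop_eq_nil_of_le; omega
    exact pv_loop_base content link start acc h2 (by rw [hdrop]; exact pv_find_nil _ (by simp))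
  | succ m ih =>
    intro start acc h1 h2 h3
    by_cases hA : PySem.Chars.find (content.drop start) ('`' :: (link ++ ['`'])) = -1
    · exact pv_loop_base content link start acc h2 hA
    · obtain ⟨hF0, hFb, -⟩ := pv_find_pos_bounds (content.drop start) ('`' :: (link ++ ['`'])) hA
      rw [List.length_drop] at hFb
      have hnsv : PySem.Chars.findFrom content ('`' :: (link ++ ['`'])) (start : Int) none
          = (start : Int) + PySem.Chars.find (content.drop start) ('`' :: (link ++ ['`'])) := by
        rw [PySem.Chars.findFrom_natCast content _ start h2, if_neg hA]
      have hnsne : ¬ PySem.Chars.findFrom content ('`' :: (link ++ ['`'])) (start : Int) none = -1 := by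
        rw [hnsv]; omega
      rw [addLinksLoop]
      dsimp only
      rw [dif_neg hnsne]
      rw [hnsv]
      have hcast : (start : Int) + PySem.Chars.find (content.drop start) ('`' :: (link ++ ['`']))
          = ((start + (PySem.Chars.find (content.drop start) ('`' :: (link ++ ['`']))).toNat : Nat) : Int) := by
        omega
      rw [hcast]
      rw [PySem.Chars.slice_eq_listSlice, PySem.List.slice_natCast, Nat.add_sub_cancel_left]
      -- the accumulated output at the [-1] test
      have hacc1 : acc ++ List.take (PySem.Chars.find (content.drop start) ('`' :: (link ++ ['`']))).toNat
          (content.drop start) ≠ [] := by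
        rcases h3 with h3 | h3
        · simp [h3]
        · have htk : (List.take (PySem.Chars.find (content.drop start) ('`' :: (link ++ ['`']))).toNat
              (content.drop start)).length ≠ 0 := by
            rw [List.length_take, List.length_drop]; omega
          intro hcon
          rw [List.append_eq_nil_iff] at hcon
          exact htk (by rw [hcon.2]; simp)
      obtain ⟨lc, hlc⟩ := Option.isSome_iff_exists.mp (List.getLast?_isSome.mpr hacc1)
      rw [pv_pyGet_neg_one _ hacc1, hlc]
      dsimp only
      -- the new scan position
      have htoNat : ((start + (PySem.Chars.find (content.drop start) ('`' :: (link ++ ['`']))).toNat : Nat) : Int).toNat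
          = start + (PySem.Chars.find (content.drop start) ('`' :: (link ++ ['`']))).toNat := by omega
      rw [htoNat]
      -- unfold one step of pieces on the right
      conv_rhs => rw [pieces]
      rw [dif_neg hA]
      dsimp only [gfold]
      obtain ⟨q', t', hqt⟩ := List.exists_cons_of_ne_nil (pieces_ne_nil link []
        ((content.drop start).drop ((PySem.Chars.find (content.drop start) ('`' :: (link ++ ['`']))).toNat
          + ('`' :: (link ++ ['`'])).length)))
      have hdd : (content.drop start).drop ((PySem.Chars.find (content.drop start) ('`' :: (link ++ ['`']))).toNat
            + ('`' :: (link ++ ['`'])).length)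
          = content.drop (start + (PySem.Chars.find (content.drop start) ('`' :: (link ++ ['`']))).toNat
            + ('`' :: (link ++ ['`'])).length) := by
        rw [List.drop_drop]; congr 1; omega
      simp only [List.nil_append]
      rw [hqt, List.foldl_cons]
      have hlen2 : ('`' :: (link ++ ['`'])).length = link.length + 2 := by simp
      have hm2 : start + (PySem.Chars.find (content.drop start) ('`' :: (link ++ ['`']))).toNat
          + ('`' :: (link ++ ['`'])).length ≤ content.length := by omega
      have hm1 : content.length - (start + (PySem.Chars.find (content.drop start)
          ('`' :: (link ++ ['`']))).toNat + ('`' :: (link ++ ['`'])).length) ≤ m := by omega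
      have hgf : ∀ acc2 : List Char, acc2 ≠ [] →
          addLinksLoop content link (start + (PySem.Chars.find (content.drop start)
            ('`' :: (link ++ ['`']))).toNat + ('`' :: (link ++ ['`'])).length) acc2
          = List.foldl (linkStep link) (acc2 ++ q') t' := by
        intro acc2 hacc2
        rw [ih _ acc2 hm1 hm2 (Or.inl hacc2)]
        rw [← hdd, hqt]
        dsimp only [gfold]
      -- the bracket tests coincide
      have hsw : PySem.Chars.endswith (acc ++ List.take (PySem.Chars.find (content.drop start)
          ('`' :: (link ++ ['`']))).toNat (content.drop start)) ['['] = decide (lc = '[') := by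
        by_cases hbr : lc = '['
        · subst hbr
          simp only [decide_true]
          rw [pv_endswith_single]
          exact hlc
        · simp only [hbr, decide_false]
          rw [← Bool.not_eq_true, pv_endswith_single, hlc]
          simp [hbr]
      rw [linkStep]
      rw [hsw]
      by_cases hbr : lc = '['
      · rw [if_pos hbr]
        simp only [hbr, decide_true, if_true]
        exact hgf _ (by simp)
      · rw [if_neg hbr]
        simp only [hbr, decide_false]
        exact hgf _ (by simp)
-- ===== VERDICT (by name: the statement is the Claim_ definition above) =====
theorem pv_gfold_top (link : List Char) (ps : List (List Char)) (hps : ps ≠ []) :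
    (ps.drop 1).foldl (linkStep link) (ps.headD []) = gfold link [] ps := by
  cases ps with
  | nil => exact absurd rfl hps
  | cons p rest => simp [gfold]

theorem add_links_spec : Claim_equal_add_links := by
  intro content link_name _ hPre
  unfold Spec_add_links add_links add_links_alt
  dsimp only
  rw [pv_splitOn_eq_pieces]
  rw [pv_gfold_top link_name.toList _ (pieces_ne_nil _ _ _)]
  have hfind0 : PySem.Chars.find (content.toList.drop 0) ('`' :: (link_name.toList ++ ['`'])) ≠ 0 := by
    rw [List.drop_zero]
    intro h0
    have hb := pv_find_pos_bounds content.toList ('`' :: (link_name.toList ++ ['`'])) (by rw [h0]; decide)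
    rw [h0] at hb
    simp only [Int.toNat_zero, List.drop_zero] at hb
    unfold Pre_add_links at hPre
    rw [← Bool.not_eq_true, PySem.Chars.startswith_iff] at hPre
    exact hPre hb.2.2
  have := pv_loop_eq content.toList link_name.toList content.toList.length 0 []
    (by omega) (by omega) (Or.inr hfind0)
  rw [this, List.drop_zero]

theorem add_links_raises : Claim_raises_add_links := by
  unfold Claim_raises_add_links
  constructor
  · intro content link_name _ hR hP
    unfold Raises_add_links at hR; unfold Pre_add_links at hP
    rw [hR] at hP; cases hP
  · exact ⟨by decide, by decide, by decide⟩

-- sanity self-check: the recorded raise-witness really lies inside Raises_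
theorem pvRaiseWitness_ok :
    Raises_add_links pvRaiseWitness_add_links.1 pvRaiseWitness_add_links.2 := by
  have h := add_links_raises
  unfold Claim_raises_add_links at h
  exact h.2.2.1
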